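-- pv_equiv track=rewrite | github.com/znadrich/grammar_checker | utils.py | trigrams_words
-- ===== SOURCE A (Python) =====
-- def trigrams_words(s):
--     """
--     Turn a sentence into a series of trigram phrases
--
--     Args:
--         s (list): Tokenized sentence
--
--     Returns:
--         list: List of trigram phrases
--     """
--     words = []
--     for ix, w_ix in enumerate(s):
--         if ix == 0 or ix == len(s)-1:
--             pass
--         else:
--             phrase = [s[ix-1], w_ix, s[ix+1]]
--             phrase = ' '.join(phrase)
--             words.append(phrase)
--     return words
-- ===== SOURCE B (Python) =====
-- def trigrams_words(s):
--     """
--     Turn a sentence into a series of trigram phrases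
--
--     Args:
--         s (list): Tokenized sentence
--
--     Returns:
--         list: List of trigram phrases
--     """
--     words = []
--     prev2 = prev1 = None
--     for w in s:
--         if prev2 is not None:
--             words.append(' '.join([prev2, prev1, w]))
--         prev2, prev1 = prev1, w
--     return words
-- ===== Notes on version B (the rewrite author's own statement) =====
-- stated objective: alternative
-- what changed: Replaces the index loop with first/last guards and random access s[ix-1]/s[ix+1] by a streaming single pass that carries the last two tokens as state, so no indexing or length arithmetic is needed.
import Mathlib
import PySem

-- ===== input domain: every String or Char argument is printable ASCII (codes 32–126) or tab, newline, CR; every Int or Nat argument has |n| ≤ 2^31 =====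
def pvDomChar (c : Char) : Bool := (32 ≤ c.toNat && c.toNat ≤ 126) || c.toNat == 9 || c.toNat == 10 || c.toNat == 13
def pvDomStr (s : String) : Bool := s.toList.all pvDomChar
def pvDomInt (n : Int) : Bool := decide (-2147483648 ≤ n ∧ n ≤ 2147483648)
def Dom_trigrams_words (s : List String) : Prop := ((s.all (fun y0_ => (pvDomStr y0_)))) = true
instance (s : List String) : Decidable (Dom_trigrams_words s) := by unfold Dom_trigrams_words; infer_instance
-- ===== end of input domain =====

-- B replaces A's index loop (first/last skip guards, random access s[ix-1]/s[ix+1]) by a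
-- streaming pass that carries the last two tokens as state (alternative; same cost).

-- ===== PORT A =====
-- indices ix-1 and ix+1 are always in range when the guard fails, so pyGetD's default "" is never used
def trigrams_words (s : List String) : List String :=
  (PySem.List.enumerate s).foldl
    (fun words p =>
      if p.1 = 0 ∨ p.1 = (s.length : Int) - 1 then words
      else words ++ [PySem.Str.join " "
        [PySem.List.pyGetD s (p.1 - 1) "", p.2, PySem.List.pyGetD s (p.1 + 1) ""]])
    []

-- ===== PORT B =====
-- the Python checks only `prev2 is not None`; by the loop invariant prev2 ≠ None implies
-- prev1 ≠ None, so matching both options together is exact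
def trigrams_words_alt (s : List String) : List String :=
  (s.foldl
    (fun st w =>
      match st with
      | (some p2, some p1, ws) => (some p1, some w, ws ++ [PySem.Str.join " " [p2, p1, w]])
      | (_p2, p1, ws) => (p1, some w, ws))
    ((none, none, []) : Option String × Option String × List String)).2.2

-- ===== PRECONDITION & SPEC =====
def Spec_trigrams_words (s : List String) (out : List String) : Prop := out = trigrams_words_alt s
instance (s : List String) (out : List String) : Decidable (Spec_trigrams_words s out) := by unfold Spec_trigrams_words; infer_instance

-- ===== CLAIM (what is proved, stated in full; the proofs are below) =====
def Claim_equal_trigrams_words : Prop := ∀ (s : List String), Dom_trigrams_words s → Spec_trigrams_words s (trigrams_words s)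

-- ===== LEMMAS AND PROOFS =====

-- recursive characterisation of the trigram list, used to relate both ports
def trig : List String → List String
  | a :: b :: c :: t => PySem.Str.join " " [a, b, c] :: trig (b :: c :: t)
  | _ => []

-- A's loop is an append-if fold, i.e. filter-then-map over the enumerated list
theorem trigrams_words_eq_filter_map (s : List String) :
    trigrams_words s =
      ((PySem.List.enumerate s).filter
        (fun p => !(decide (p.1 = 0) || decide (p.1 = (s.length : Int) - 1)))).map
        (fun p => PySem.Str.join " "
          [PySem.List.pyGetD s (p.1 - 1) "", p.2, PySem.List.pyGetD s (p.1 + 1) ""]) := by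
  unfold trigrams_words
  have h := PySem.List.foldl_append_ite
    (l := PySem.List.enumerate s)
    (p := fun p : Int × String => ¬(p.1 = 0 ∨ p.1 = (s.length : Int) - 1))
    (f := fun p => PySem.Str.join " "
      [PySem.List.pyGetD s (p.1 - 1) "", p.2, PySem.List.pyGetD s (p.1 + 1) ""])
    (acc := [])
  simp only [ite_not] at h
  rw [h]
  simp [decide_not]

-- range n with first and last index removed = shifted range (n-2)
theorem filter_range_middle (n : Nat) :
    ((List.range n).filter (fun j => !(decide (j = 0) || decide (j = n - 1)))) =
      (List.range (n - 2)).map (· + 1) := by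
  match n with
  | 0 => simp
  | 1 => simp
  | (m+2) =>
    rw [List.range_succ_eq_map]
    simp only [List.filter_cons, List.filter_map, Function.comp_def]
    rw [show (m+2-2) = m by omega]
    norm_num
    rw [List.range_succ, List.filter_append,
      List.filter_eq_self.2 (fun j hj => by simp [List.mem_range] at hj ⊢; omega)]
    simp

-- A in canonical form: one trigram per window start k < len - 2
theorem A_canon (s : List String) :
    trigrams_words s =
      (List.range (s.length - 2)).map
        (fun k => PySem.Str.join " " [s.getD k "", s.getD (k+1) "", s.getD (k+2) ""]) := by
  rw [trigrams_words_eq_filter_map,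
    PySem.List.enumerate_eq_map_pyRange (d := ""),
    show PySem.List.len s = ((s.length : Nat) : Int) from rfl, PySem.List.pyRange_zero_nat,
    List.map_map, List.filter_map, List.map_map]
  rw [List.filter_congr (l := List.range s.length)
    (q := fun j => !(decide (j = 0) || decide (j = s.length - 1)))
    (by intro j hj; simp only [List.mem_range] at hj
        simp only [Function.comp_def]
        have h0 : ((j:Int) = 0) ↔ (j = 0) := by omega
        have h1 : ((j:Int) = (s.length:Int) - 1) ↔ (j = s.length - 1) := by omega
        simp only [decide_eq_decide.2 h0, decide_eq_decide.2 h1])]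
  rw [filter_range_middle, List.map_map]
  apply List.map_congr_left
  intro k hk
  simp only [Function.comp_def]
  rw [show ((↑(k+1):Int) - 1) = ((k:Nat):Int) by push_cast; ring,
      show ((↑(k+1):Int) + 1) = ((k+2:Nat):Int) by push_cast; ring]
  simp only [PySem.List.pyGetD_natCast]

-- the canonical form satisfies trig's recursion
theorem canon_eq_trig (s : List String) :
    (List.range (s.length - 2)).map
        (fun k => PySem.Str.join " " [s.getD k "", s.getD (k+1) "", s.getD (k+2) ""]) =
      trig s := by
  induction s with
  | nil => simp [trig]
  | cons a l ih =>
    match l with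
    | [] => simp [trig]
    | [b] => simp [trig]
    | b :: c :: t =>
      have hlen : (a :: b :: c :: t).length - 2 = t.length + 1 := by simp
      rw [hlen, List.range_succ_eq_map, List.map_cons, List.map_map]
      show _ :: _ = trig (a :: b :: c :: t)
      rw [trig]
      congr 1

-- the invariant of B's fold once both carried tokens are present
theorem B_fold_inv (l : List String) (p2 p1 : String) (ws : List String) :
    (l.foldl
      (fun st w =>
        match st with
        | (some p2, some p1, ws) => (some p1, some w, ws ++ [PySem.Str.join " " [p2, p1, w]])
        | (_p2, p1, ws) => (p1, some w, ws))
      ((some p2, some p1, ws) : Option String × Option String × List String)).2.2 =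
      ws ++ trig (p2 :: p1 :: l) := by
  induction l generalizing p2 p1 ws with
  | nil => simp [trig]
  | cons w l ih =>
    simp only [List.foldl_cons]
    rw [ih, trig]
    simp

-- B equals trig
theorem B_eq_trig (s : List String) : trigrams_words_alt s = trig s := by
  match s with
  | [] => rfl
  | [a] => rfl
  | a :: b :: l =>
    unfold trigrams_words_alt
    simp only [List.foldl_cons]
    exact B_fold_inv l a b []

-- ===== VERDICT (by name: the statement is the Claim_ definition above) =====
theorem trigrams_words_spec : Claim_equal_trigrams_words := by
  intro s _
  unfold Spec_trigrams_words
  rw [A_canon, canon_eq_trig, B_eq_trig]
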